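-- pv_equiv track=rewrite | github.com/pplcheckride/PPL-Oral-Exam-Prep | tools/content-gen/normalize_deep_links.py | aim_section_url
-- ===== SOURCE A (Python) =====
-- def aim_section_url(reference: str, topic: str, title: str) -> str:
--     text = f"{reference} {topic} {title}".lower()
--
--     if any(k in text for k in [
--         "runway incursion", "taxi", "hold short", "hot spot", "airport signs",
--         "airport markings", "surface movement", "non-towered", "runway marking",
--         "airport lighting", "declared distances"
--     ]):
--         return "https://www.faa.gov/air_traffic/publications/atpubs/aim_html/chap2_section_3.html"
--     if any(k in text for k in ["traffic pattern", "towered airport"]):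
--         return "https://www.faa.gov/air_traffic/publications/atpubs/aim_html/chap4_section_3.html"
--     if any(k in text for k in ["radar services", "flight following", "vfr advisories"]):
--         return "https://www.faa.gov/air_traffic/publications/atpubs/aim_html/chap4_section_1.html"
--     if any(k in text for k in ["phraseology", "communications", "light gun", "comm failure"]):
--         return "https://www.faa.gov/air_traffic/publications/atpubs/aim_html/chap4_section_2.html"
--     if any(k in text for k in ["vor", "dme", "gps"]):
--         return "https://www.faa.gov/air_traffic/publications/atpubs/aim_html/chap1_section_1.html"
--
--     return "https://www.faa.gov/air_traffic/publications/atpubs/aim_html/chap2_section_3.html"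
-- ===== SOURCE B (Python) =====
-- # B: a flat keyword -> priority index; the answer is the URL of the SMALLEST priority among
-- # all keywords occurring in the text (min with default 1), instead of an ordered chain of group tests.
-- _URLS = {
--     1: "https://www.faa.gov/air_traffic/publications/atpubs/aim_html/chap2_section_3.html",
--     2: "https://www.faa.gov/air_traffic/publications/atpubs/aim_html/chap4_section_3.html",
--     3: "https://www.faa.gov/air_traffic/publications/atpubs/aim_html/chap4_section_1.html",
--     4: "https://www.faa.gov/air_traffic/publications/atpubs/aim_html/chap4_section_2.html",
--     5: "https://www.faa.gov/air_traffic/publications/atpubs/aim_html/chap1_section_1.html",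
-- }
--
-- _KEYWORD_PRIORITY = {
--     "runway incursion": 1, "taxi": 1, "hold short": 1, "hot spot": 1, "airport signs": 1,
--     "airport markings": 1, "surface movement": 1, "non-towered": 1, "runway marking": 1,
--     "airport lighting": 1, "declared distances": 1,
--     "traffic pattern": 2, "towered airport": 2,
--     "radar services": 3, "flight following": 3, "vfr advisories": 3,
--     "phraseology": 4, "communications": 4, "light gun": 4, "comm failure": 4,
--     "vor": 5, "dme": 5, "gps": 5,
-- }
--
-- def aim_section_url(reference: str, topic: str, title: str) -> str:
--     text = f"{reference} {topic} {title}".lower()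
--     best = min((p for k, p in _KEYWORD_PRIORITY.items() if k in text), default=1)
--     return _URLS[best]
-- ===== Notes on version B (the rewrite author's own statement) =====
-- stated objective: alternative
-- what changed: Replaced the ordered five-branch short-circuit chain by a flat keyword-to-priority dict: collect the priorities of ALL keywords occurring in the text and return the URL of the minimum priority (default 1), so priority resolution is arithmetic (min over a matched set) rather than branch order.
import Mathlib
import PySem

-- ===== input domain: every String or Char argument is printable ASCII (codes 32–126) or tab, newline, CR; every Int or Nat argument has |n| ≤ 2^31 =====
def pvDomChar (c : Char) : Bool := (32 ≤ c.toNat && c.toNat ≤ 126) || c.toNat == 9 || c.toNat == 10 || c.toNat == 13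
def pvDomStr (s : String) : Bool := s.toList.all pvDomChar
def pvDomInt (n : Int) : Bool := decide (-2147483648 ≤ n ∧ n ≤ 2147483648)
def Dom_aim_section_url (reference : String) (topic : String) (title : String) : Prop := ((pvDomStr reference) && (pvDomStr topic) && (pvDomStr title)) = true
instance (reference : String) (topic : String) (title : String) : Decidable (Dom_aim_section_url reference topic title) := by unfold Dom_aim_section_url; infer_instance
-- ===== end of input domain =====

-- B replaces A's ordered five-branch chain by a flat keyword→priority map and a min over matched priorities (alternative decomposition, same cost).


-- ===== PORT A =====
-- Literal port of A: lowercase the combined text once, then five explicit `any`-branches in order.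
def aim_section_url (reference : String) (topic : String) (title : String) : String :=
  let text := PySem.Str.lower (reference ++ " " ++ topic ++ " " ++ title)
  if ["runway incursion", "taxi", "hold short", "hot spot", "airport signs",
      "airport markings", "surface movement", "non-towered", "runway marking",
      "airport lighting", "declared distances"].any (fun k => PySem.Str.isIn k text) then
    "https://www.faa.gov/air_traffic/publications/atpubs/aim_html/chap2_section_3.html"
  else if ["traffic pattern", "towered airport"].any (fun k => PySem.Str.isIn k text) then
    "https://www.faa.gov/air_traffic/publications/atpubs/aim_html/chap4_section_3.html"
  else if ["radar services", "flight following", "vfr advisories"].any (fun k => PySem.Str.isIn k text) then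
    "https://www.faa.gov/air_traffic/publications/atpubs/aim_html/chap4_section_1.html"
  else if ["phraseology", "communications", "light gun", "comm failure"].any (fun k => PySem.Str.isIn k text) then
    "https://www.faa.gov/air_traffic/publications/atpubs/aim_html/chap4_section_2.html"
  else if ["vor", "dme", "gps"].any (fun k => PySem.Str.isIn k text) then
    "https://www.faa.gov/air_traffic/publications/atpubs/aim_html/chap1_section_1.html"
  else
    "https://www.faa.gov/air_traffic/publications/atpubs/aim_html/chap2_section_3.html"

-- ===== PORT B =====
-- B: flat keyword→priority dict (insertion order groups priorities 1..5); min over matched priorities.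
def pvGrp1 : List String :=
  ["runway incursion", "taxi", "hold short", "hot spot", "airport signs",
   "airport markings", "surface movement", "non-towered", "runway marking",
   "airport lighting", "declared distances"]
def pvGrp2 : List String := ["traffic pattern", "towered airport"]
def pvGrp3 : List String := ["radar services", "flight following", "vfr advisories"]
def pvGrp4 : List String := ["phraseology", "communications", "light gun", "comm failure"]
def pvGrp5 : List String := ["vor", "dme", "gps"]

-- Source B's _KEYWORD_PRIORITY dict as its (key, value) items in insertion order (keys are distinct).
def pvKeywordPriority : List (String × Int) :=
  pvGrp1.map (fun k => (k, 1)) ++ (pvGrp2.map (fun k => (k, 2)) ++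
    (pvGrp3.map (fun k => (k, 3)) ++ (pvGrp4.map (fun k => (k, 4)) ++ pvGrp5.map (fun k => (k, 5)))))

-- Source B's _URLS[best]: best is always a key of _URLS (min returns 1..5, default 1), so the
-- get? never misses and the "" default of getD is unreachable.
def pvUrlOf (p : Int) : String :=
  (PySem.Dict.get? (PySem.Dict.ofList
    [((1:Int), "https://www.faa.gov/air_traffic/publications/atpubs/aim_html/chap2_section_3.html"),
     (2, "https://www.faa.gov/air_traffic/publications/atpubs/aim_html/chap4_section_3.html"),
     (3, "https://www.faa.gov/air_traffic/publications/atpubs/aim_html/chap4_section_1.html"),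
     (4, "https://www.faa.gov/air_traffic/publications/atpubs/aim_html/chap4_section_2.html"),
     (5, "https://www.faa.gov/air_traffic/publications/atpubs/aim_html/chap1_section_1.html")]) p).getD ""

def aim_section_url_alt (reference : String) (topic : String) (title : String) : String :=
  let text := PySem.Str.lower (reference ++ " " ++ topic ++ " " ++ title)
  let best := PySem.List.minD
    ((pvKeywordPriority.filter (fun kp => PySem.Str.isIn kp.1 text)).map (fun kp => kp.2))
    (fun x => x) 1
  pvUrlOf best

-- ===== PRECONDITION & SPEC =====
def Spec_aim_section_url (reference : String) (topic : String) (title : String) (out : String) : Prop := out = aim_section_url_alt reference topic title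
instance (reference : String) (topic : String) (title : String) (out : String) : Decidable (Spec_aim_section_url reference topic title out) := by unfold Spec_aim_section_url; infer_instance

-- ===== CLAIM =====
def Claim_equal_aim_section_url : Prop := ∀ (reference : String) (topic : String) (title : String), Dom_aim_section_url reference topic title → Spec_aim_section_url reference topic title (aim_section_url reference topic title)

-- ===== LEMMAS AND PROOFS =====

theorem pv_foldl_min_const (p : Int) : ∀ (l : List Int), (∀ x ∈ l, p ≤ x) → l.foldl min p = p
  | [], _ => rfl
  | a :: t, h => by
      rw [List.foldl_cons, min_eq_left (h a (by simp))]
      exact pv_foldl_min_const p t (fun x hx => h x (by simp [hx]))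

theorem pv_minD_rep (n : Nat) (p : Int) (l : List Int) (h : ∀ x ∈ l, p ≤ x) (d : Int) :
    PySem.List.minD (List.replicate n p ++ l) (fun x => x) d =
      if n = 0 then PySem.List.minD l (fun x => x) d else p := by
  cases n with
  | zero => simp
  | succ m =>
    simp only [List.replicate_succ, List.cons_append, Nat.succ_ne_zero]
    rw [show PySem.List.minD (p :: (List.replicate m p ++ l)) (fun x => x) d
        = (List.replicate m p ++ l).foldl min p by
      simp [PySem.List.minD, PySem.List.min?_id_cons]]
    refine pv_foldl_min_const p _ (fun x hx => ?_)
    rcases List.mem_append.1 hx with h1 | h2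
    · exact le_of_eq (List.eq_of_mem_replicate h1).symm
    · exact h x h2

theorem pv_map_filter_const (p : Int) (pred : String → Bool) : ∀ (g : List String),
    (((g.map (fun k => (k, p))).filter (fun kp => pred kp.1)).map (fun kp => kp.2))
      = List.replicate (g.countP pred) p
  | [] => rfl
  | a :: t => by
      by_cases h : pred a
      · simp [h, List.replicate_succ,
              pv_map_filter_const p pred t]
      · simp [h, pv_map_filter_const p pred t]

theorem pv_minD_chain (n1 n2 n3 n4 n5 : Nat) :
    PySem.List.minD
      (List.replicate n1 (1:Int) ++ (List.replicate n2 2 ++ (List.replicate n3 3 ++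
        (List.replicate n4 4 ++ List.replicate n5 5)))) (fun x => x) 1
    = if n1 = 0 then if n2 = 0 then if n3 = 0 then if n4 = 0 then if n5 = 0
        then 1 else 5 else 4 else 3 else 2 else 1 := by
  have mem5 : ∀ x ∈ (List.replicate n5 (5:Int) ++ []), (5:Int) ≤ x := by
    intro x hx; rw [List.append_nil] at hx; rw [List.eq_of_mem_replicate hx]
  have mem4 : ∀ x ∈ List.replicate n4 (4:Int) ++ (List.replicate n5 5 ++ []), (4:Int) ≤ x := by
    intro x hx; rcases List.mem_append.1 hx with h | h
    · rw [List.eq_of_mem_replicate h]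
    · exact le_trans (by norm_num) (mem5 x h)
  have mem3 : ∀ x ∈ List.replicate n3 (3:Int) ++ (List.replicate n4 4 ++ (List.replicate n5 5 ++ [])),
      (3:Int) ≤ x := by
    intro x hx; rcases List.mem_append.1 hx with h | h
    · rw [List.eq_of_mem_replicate h]
    · exact le_trans (by norm_num) (mem4 x h)
  have mem2 : ∀ x ∈ List.replicate n2 (2:Int) ++ (List.replicate n3 3 ++
      (List.replicate n4 4 ++ (List.replicate n5 5 ++ []))), (2:Int) ≤ x := by
    intro x hx; rcases List.mem_append.1 hx with h | h
    · rw [List.eq_of_mem_replicate h]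
    · exact le_trans (by norm_num) (mem3 x h)
  rw [show List.replicate n5 (5:Int) = List.replicate n5 5 ++ [] from (List.append_nil _).symm]
  rw [pv_minD_rep n1 1 _ (fun x hx => le_trans (by norm_num) (mem2 x hx)) 1,
      pv_minD_rep n2 2 _ (fun x hx => le_trans (by norm_num) (mem3 x hx)) 1,
      pv_minD_rep n3 3 _ (fun x hx => le_trans (by norm_num) (mem4 x hx)) 1,
      pv_minD_rep n4 4 _ (fun x hx => le_trans (by norm_num) (mem5 x hx)) 1,
      pv_minD_rep n5 5 [] (by simp) 1]
  simp [PySem.List.minD, PySem.List.min?]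

theorem pv_count_any (pred : String → Bool) (g : List String) :
    (g.countP pred = 0) ↔ ¬ (g.any pred = true) := by
  simp [List.countP_eq_zero, List.any_eq_true]

theorem pv_url1 : pvUrlOf 1 = "https://www.faa.gov/air_traffic/publications/atpubs/aim_html/chap2_section_3.html" := rfl
theorem pv_url2 : pvUrlOf 2 = "https://www.faa.gov/air_traffic/publications/atpubs/aim_html/chap4_section_3.html" := rfl
theorem pv_url3 : pvUrlOf 3 = "https://www.faa.gov/air_traffic/publications/atpubs/aim_html/chap4_section_1.html" := rfl
theorem pv_url4 : pvUrlOf 4 = "https://www.faa.gov/air_traffic/publications/atpubs/aim_html/chap4_section_2.html" := rfl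
theorem pv_url5 : pvUrlOf 5 = "https://www.faa.gov/air_traffic/publications/atpubs/aim_html/chap1_section_1.html" := rfl

-- ===== VERDICT =====
set_option maxHeartbeats 1600000 in
theorem aim_section_url_spec : Claim_equal_aim_section_url := by
  intro reference topic title _
  unfold Spec_aim_section_url
  simp only [aim_section_url, aim_section_url_alt]
  set text := PySem.Str.lower (reference ++ " " ++ topic ++ " " ++ title) with htext
  set pred : String → Bool := fun k => PySem.Str.isIn k text with hpred
  have hfun : (fun kp : String × Int => PySem.Str.isIn kp.1 text) = (fun kp => pred kp.1) := rfl
  rw [show pvKeywordPriority = pvGrp1.map (fun k => (k, 1)) ++ (pvGrp2.map (fun k => (k, 2)) ++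
    (pvGrp3.map (fun k => (k, 3)) ++ (pvGrp4.map (fun k => (k, 4)) ++ pvGrp5.map (fun k => (k, 5)))))
    from rfl, hfun]
  simp only [List.filter_append, List.map_append, pv_map_filter_const]
  rw [pv_minD_chain]
  rw [show (["runway incursion", "taxi", "hold short", "hot spot", "airport signs",
      "airport markings", "surface movement", "non-towered", "runway marking",
      "airport lighting", "declared distances"] : List String) = pvGrp1 from rfl,
    show (["traffic pattern", "towered airport"] : List String) = pvGrp2 from rfl,
    show (["radar services", "flight following", "vfr advisories"] : List String) = pvGrp3 from rfl,
    show (["phraseology", "communications", "light gun", "comm failure"] : List String) = pvGrp4 from rfl,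
    show (["vor", "dme", "gps"] : List String) = pvGrp5 from rfl]
  simp only [pv_count_any]
  by_cases g1 : pvGrp1.any pred = true <;>
  by_cases g2 : pvGrp2.any pred = true <;>
  by_cases g3 : pvGrp3.any pred = true <;>
  by_cases g4 : pvGrp4.any pred = true <;>
  by_cases g5 : pvGrp5.any pred = true <;>
    simp [g1, g2, g3, g4, g5, pv_url1, pv_url2, pv_url3, pv_url4, pv_url5]
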